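-- pv_equiv track=rewrite | github.com/busi-reddy-karnati/InterviewPreparation | single-number-iii/single-number-iii.py | helper
-- ===== SOURCE A (Python) =====
-- def helper(nums,index):
--     nu = 1<<index
--     res1 = 0
--     res2 = 0
--     for num in nums:
--         if nu & num:
--             res1 = res1^num
--         else:
--             res2 = res2^num
--     return [res1,res2]
-- ===== SOURCE B (Python) =====
-- def helper(nums, index):
--     mask = 1 << index
--     ones = [n for n in nums if n & mask]
--     zeros = [n for n in nums if not (n & mask)]
--     return [xor_all(ones), xor_all(zeros)]
--
-- def xor_all(xs):
--     acc = 0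
--     for x in xs:
--         acc ^= x
--     return acc
-- ===== Notes on version B (the rewrite author's own statement) =====
-- stated objective: alternative
-- what changed: B splits the work into staged passes: it first partitions the list into the bit-set and bit-clear sublists with two filters, then reduces each sublist with a generic xor_all fold, instead of A's single pass that routes each element into one of two accumulators with an if/else.
import Mathlib
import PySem

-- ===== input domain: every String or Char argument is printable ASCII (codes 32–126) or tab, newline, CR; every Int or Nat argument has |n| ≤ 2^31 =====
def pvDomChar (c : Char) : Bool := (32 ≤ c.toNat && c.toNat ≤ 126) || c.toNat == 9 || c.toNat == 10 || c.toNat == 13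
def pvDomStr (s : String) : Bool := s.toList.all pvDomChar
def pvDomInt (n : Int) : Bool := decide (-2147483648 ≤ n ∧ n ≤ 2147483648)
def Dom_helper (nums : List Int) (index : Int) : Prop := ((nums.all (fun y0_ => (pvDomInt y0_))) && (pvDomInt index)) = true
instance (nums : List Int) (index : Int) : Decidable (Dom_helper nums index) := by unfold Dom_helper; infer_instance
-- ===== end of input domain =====

-- B partitions the list into the bit-set/bit-clear sublists with two filters and then
-- XOR-reduces each sublist, instead of A's single pass with two branch-selected accumulators.


-- ===== PORT A =====
-- one step of A's loop body: if nu & num then res1 ^= num else res2 ^= num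
def stepA (nu : Int) (p : Int × Int) (num : Int) : Int × Int :=
  if PySem.Int.band nu num ≠ 0 then (PySem.Int.bxor p.1 num, p.2)
  else (p.1, PySem.Int.bxor p.2 num)

def helper (nums : List Int) (index : Int) : List Int :=
  let nu : Int := (1 : Int) <<< index.toNat
  let st := nums.foldl (stepA nu) (0, 0)
  [st.1, st.2]

-- ===== PORT B =====
-- xor_all: XOR-reduce a list with accumulator 0
def xorAll (xs : List Int) : Int := xs.foldl PySem.Int.bxor 0

def helper_alt (nums : List Int) (index : Int) : List Int :=
  let mask : Int := (1 : Int) <<< index.toNat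
  let ones := nums.filter (fun n => PySem.Int.band n mask ≠ 0)
  let zeros := nums.filter (fun n => ¬ (PySem.Int.band n mask ≠ 0))
  [xorAll ones, xorAll zeros]

-- ===== PRECONDITION & SPEC =====
-- Pre_ excludes negative index only: Python raises ValueError on 1 << index there.
def Pre_helper (_nums : List Int) (index : Int) : Prop := 0 ≤ index
instance (nums : List Int) (index : Int) : Decidable (Pre_helper nums index) := by unfold Pre_helper; infer_instance
def pvWitness_helper : List Int × Int := ([1, 2, 1, 3], 0)
def Spec_helper (nums : List Int) (index : Int) (out : List Int) : Prop := out = helper_alt nums index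
instance (nums : List Int) (index : Int) (out : List Int) : Decidable (Spec_helper nums index out) := by unfold Spec_helper; infer_instance

-- ===== CLAIM =====
def Claim_equal_helper : Prop := ∀ (nums : List Int) (index : Int), Dom_helper nums index → Pre_helper nums index → Spec_helper nums index (helper nums index)

-- ===== LEMMAS AND PROOFS =====

-- sign/magnitude view of Python's infinite two's complement
def pvDec (s : Bool) (m : Nat) : Int := if s then -(m : Int) - 1 else (m : Int)
def pvSgn (a : Int) : Bool := decide (a < 0)
def pvMag (a : Int) : Nat := if 0 ≤ a then a.toNat else (-a).toNat - 1

theorem bxor_dec (a b : Int) :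
    PySem.Int.bxor a b = pvDec (pvSgn a != pvSgn b) (pvMag a ^^^ pvMag b) := by
  unfold PySem.Int.bxor pvDec pvSgn pvMag
  by_cases ha : 0 ≤ a <;> by_cases hb : 0 ≤ b <;>
    simp [ha, hb] <;> omega

theorem sgn_dec (s : Bool) (m : Nat) : pvSgn (pvDec s m) = s := by
  cases s <;> simp [pvSgn, pvDec]
  omega

theorem mag_dec (s : Bool) (m : Nat) : pvMag (pvDec s m) = m := by
  cases s
  · simp [pvMag, pvDec]
  · unfold pvMag pvDec
    rw [if_pos rfl, if_neg (by omega)]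
    omega

theorem bxor_assoc (a b c : Int) :
    PySem.Int.bxor (PySem.Int.bxor a b) c = PySem.Int.bxor a (PySem.Int.bxor b c) := by
  rw [bxor_dec a b, bxor_dec b c, bxor_dec (pvDec _ _), bxor_dec a (pvDec _ _),
      sgn_dec, mag_dec, sgn_dec, mag_dec]
  congr 1
  · cases pvSgn a <;> cases pvSgn b <;> cases pvSgn c <;> rfl
  · exact Nat.xor_assoc _ _ _

theorem foldl_bxor_acc (l : List Int) (a b : Int) :
    l.foldl PySem.Int.bxor (PySem.Int.bxor a b) = PySem.Int.bxor a (l.foldl PySem.Int.bxor b) := by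
  induction l generalizing b with
  | nil => rfl
  | cons x xs ih =>
    simp only [List.foldl_cons]
    rw [bxor_assoc, ih]

theorem xorAll_cons (x : Int) (xs : List Int) :
    xorAll (x :: xs) = PySem.Int.bxor x (xorAll xs) := by
  unfold xorAll
  simp only [List.foldl_cons]
  have h0 : PySem.Int.bxor (0 : Int) x = PySem.Int.bxor x 0 := PySem.Int.bxor_comm 0 x
  rw [h0, foldl_bxor_acc]

-- Invariant: A's fold state equals the componentwise XOR of the accumulators
-- with the XOR-reductions of the two filtered sublists.
theorem foldA_eq_filters (nu : Int) (nums : List Int) (r1 r2 : Int) :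
    nums.foldl (stepA nu) (r1, r2)
    = (PySem.Int.bxor r1 (xorAll (nums.filter (fun n => PySem.Int.band n nu ≠ 0))),
       PySem.Int.bxor r2 (xorAll (nums.filter (fun n => ¬ (PySem.Int.band n nu ≠ 0))))) := by
  induction nums generalizing r1 r2 with
  | nil =>
    show (r1, r2) = _
    rw [show xorAll (List.filter _ []) = 0 from rfl, show xorAll (List.filter _ []) = 0 from rfl,
        PySem.Int.bxor_zero, PySem.Int.bxor_zero]
  | cons x xs ih =>
    simp only [List.foldl_cons, stepA]
    have hcomm : PySem.Int.band nu x = PySem.Int.band x nu := PySem.Int.band_comm nu x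
    by_cases h : PySem.Int.band x nu ≠ 0
    · rw [if_pos (hcomm ▸ h)]
      rw [List.filter_cons_of_pos (by simpa using h),
          List.filter_cons_of_neg (by simpa using h), ih, xorAll_cons, ← bxor_assoc]
    · rw [if_neg (hcomm ▸ h)]
      rw [List.filter_cons_of_neg (by simpa using h),
          List.filter_cons_of_pos (by simpa using h), ih, xorAll_cons, ← bxor_assoc]

-- ===== VERDICT =====
theorem helper_spec : Claim_equal_helper := by
  intro nums index _ _
  unfold Spec_helper
  simp only [helper, helper_alt]
  rw [foldA_eq_filters]
  have z : ∀ a : Int, PySem.Int.bxor 0 a = a := by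
    intro a; rw [PySem.Int.bxor_comm, PySem.Int.bxor_zero]
  simp [z]
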